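-- pv_equiv track=rewrite | github.com/Egham-7/adaptive | adaptive_ai/scripts/create_structured_provider_yamls.py | organize_by_provider
-- ===== SOURCE A (Python) =====
-- from collections import defaultdict
--
-- def organize_by_provider(data):
--     """Organize models by provider with sorting"""
--     providers = defaultdict(list)
--
--     for model in data['data']:
--         provider = model['provider'].lower()
--         providers[provider].append(model)
--
--     # Sort models within each provider by name
--     for provider in providers:
--         providers[provider].sort(key=lambda x: x['model'].lower())
--
--     return providers
-- ===== SOURCE B (Python) =====
-- from collections import defaultdict
--
-- def organize_by_provider(data):
--     """One global stable sort by model name; groups are then per-provider filters of that sorted list."""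
--     models = data['data']
--     ordered = sorted(models, key=lambda x: x['model'].lower())
--     keys = list(dict.fromkeys(m['provider'].lower() for m in models))
--     return defaultdict(list, {p: [m for m in ordered if m['provider'].lower() == p] for p in keys})
-- ===== Notes on version B (the rewrite author's own statement) =====
-- stated objective: alternative
-- what changed: A incrementally groups models into a defaultdict and then sorts each provider's list separately; B performs one global stable sort of all models by lowercased name, dedups the provider keys in first-appearance order, and builds each group as a filter of the already-sorted list, relying on sort stability so no per-group sort and no incremental grouping dict are needed.
import Mathlib
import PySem

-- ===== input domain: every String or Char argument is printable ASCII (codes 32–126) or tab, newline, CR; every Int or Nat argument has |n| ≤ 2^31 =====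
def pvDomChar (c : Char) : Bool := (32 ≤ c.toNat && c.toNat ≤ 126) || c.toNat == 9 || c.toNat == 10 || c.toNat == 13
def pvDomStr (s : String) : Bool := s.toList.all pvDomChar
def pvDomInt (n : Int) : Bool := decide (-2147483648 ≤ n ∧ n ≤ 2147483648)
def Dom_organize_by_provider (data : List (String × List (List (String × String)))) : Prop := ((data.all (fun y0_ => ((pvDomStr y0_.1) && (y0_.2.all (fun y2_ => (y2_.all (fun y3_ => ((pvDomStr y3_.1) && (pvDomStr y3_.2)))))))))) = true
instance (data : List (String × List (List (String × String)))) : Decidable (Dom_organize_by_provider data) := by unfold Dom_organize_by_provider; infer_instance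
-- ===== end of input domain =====

-- B replaces A's incremental defaultdict grouping + per-group sort by one global stable sort,
-- an ordered dedup of the provider keys, and a per-key filter of the sorted list; equivalence is
-- about the returned value (A returns a fresh dict, no argument is mutated).

-- shared helpers: the two key functions both Pythons use
def pvProv (m : List (String × String)) : String :=
  PySem.Str.lower ((PySem.Dict.mk m).getD "provider" "")

def pvKey (m : List (String × String)) : String :=
  PySem.Str.lower ((PySem.Dict.mk m).getD "model" "")

-- ===== PORT A =====
def organize_by_provider (data : List (String × List (List (String × String)))) : List (String × List (List (String × String))) :=
  let models := (PySem.Dict.mk data).getD "data" []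
  let providers := models.foldl (fun d m => d.modify (pvProv m) [] (fun v => v ++ [m])) PySem.Dict.empty
  (providers.items.map (fun kv => (kv.1, PySem.List.sorted kv.2 pvKey)))

-- ===== PORT B =====
def organize_by_provider_alt (data : List (String × List (List (String × String)))) : List (String × List (List (String × String))) :=
  let models := (PySem.Dict.mk data).getD "data" []
  let ordered := PySem.List.sorted models pvKey
  let keys := PySem.List.dedup (models.map pvProv)
  keys.map (fun p => (p, ordered.filter (fun m => pvProv m == p)))

-- ===== PRECONDITION & SPEC =====
-- Pre_: exactly where the Python A returns: the dict has a "data" key and every model dict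
-- has both a "provider" and a "model" key (otherwise A raises KeyError).
def Pre_organize_by_provider (data : List (String × List (List (String × String)))) : Prop :=
  (PySem.Dict.mk data).contains "data" = true ∧
  ∀ m ∈ (PySem.Dict.mk data).getD "data" [],
    (PySem.Dict.mk m).contains "provider" = true ∧ (PySem.Dict.mk m).contains "model" = true
instance (data : List (String × List (List (String × String)))) : Decidable (Pre_organize_by_provider data) := by unfold Pre_organize_by_provider; infer_instance

def pvWitness_organize_by_provider : (List (String × List (List (String × String)))) :=
  [("data", [[("provider", "P"), ("model", "b")], [("provider", "p"), ("model", "A")]])]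

def Spec_organize_by_provider (data : List (String × List (List (String × String)))) (out : List (String × List (List (String × String)))) : Prop := out = organize_by_provider_alt data
instance (data : List (String × List (List (String × String)))) (out : List (String × List (List (String × String)))) : Decidable (Spec_organize_by_provider data out) := by unfold Spec_organize_by_provider; infer_instance

-- ===== CLAIM =====
def Claim_equal_organize_by_provider : Prop := ∀ (data : List (String × List (List (String × String)))), Dom_organize_by_provider data → Pre_organize_by_provider data → Spec_organize_by_provider data (organize_by_provider data)

-- ===== LEMMAS AND PROOFS =====

-- insertBy on a cons, spelled out
theorem insertBy_cons {α : Type} (before : α → α → Bool) (x y : α) (ys : List α) :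
    PySem.List.insertBy before x (y :: ys) =
      if before x y then x :: y :: ys else y :: PySem.List.insertBy before x ys := by
  cases h : before x y <;> simp [PySem.List.insertBy, h]

-- inserting an element smaller than the head goes to the front
theorem insertBy_head {α : Type} (key : α → String) (x : α) (ys : List α)
    (h : ∀ z, ys.head? = some z → key x < key z) :
    PySem.List.insertBy (fun a b => decide (key a < key b)) x ys = x :: ys := by
  cases ys with
  | nil => rfl
  | cons y t =>
    rw [insertBy_cons, if_pos (decide_eq_true (h y rfl))]

-- filter commutes with stable insertion into a key-sorted list
theorem filter_insertBy {α : Type} (key : α → String) (p : α → Bool) (x : α) (ys : List α)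
    (h : ys.Pairwise (fun a b => key a ≤ key b)) :
    (PySem.List.insertBy (fun a b => decide (key a < key b)) x ys).filter p =
      if p x then PySem.List.insertBy (fun a b => decide (key a < key b)) x (ys.filter p)
      else ys.filter p := by
  induction ys with
  | nil =>
    cases hp : p x <;> simp [PySem.List.insertBy, List.filter, hp]
  | cons y t ih =>
    rcases List.pairwise_cons.mp h with ⟨hy, ht⟩
    by_cases hlt : key x < key y
    · rw [insertBy_cons, if_pos (decide_eq_true hlt)]
      by_cases hp : p x
      · rw [if_pos hp]
        rw [insertBy_head key x ((y :: t).filter p)]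
        · rw [List.filter_cons_of_pos hp]
        · intro z hz
          have hzmem : z ∈ (y :: t).filter p := List.mem_of_mem_head? hz
          rcases List.mem_cons.mp (List.mem_of_mem_filter hzmem) with hzy | hzt
          · exact hzy ▸ hlt
          · exact lt_of_lt_of_le hlt (hy z hzt)
      · simp only [Bool.not_eq_true] at hp
        rw [if_neg (by simp [hp]), List.filter_cons_of_neg (by simp [hp])]
    · rw [insertBy_cons, if_neg (by simp [hlt])]
      have iht := ih ht
      by_cases hp : p x
      · rw [if_pos hp] at iht ⊢
        by_cases hpy : p y
        · rw [List.filter_cons_of_pos hpy, List.filter_cons_of_pos hpy,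
            insertBy_cons, if_neg (by simp [hlt]), iht]
        · simp only [Bool.not_eq_true] at hpy
          rw [List.filter_cons_of_neg (by simp [hpy]), List.filter_cons_of_neg (by simp [hpy]), iht]
      · rw [if_neg hp] at iht ⊢
        cases hpy : p y
        · rw [List.filter_cons_of_neg (by simp [hpy]), List.filter_cons_of_neg (by simp [hpy]), iht]
        · rw [List.filter_cons_of_pos hpy, List.filter_cons_of_pos hpy, iht]

-- filter commutes with Python's stable sort
theorem filter_sorted {α : Type} (key : α → String) (p : α → Bool) (xs : List α) :
    (PySem.List.sorted xs key).filter p = PySem.List.sorted (xs.filter p) key := by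
  induction xs using List.reverseRecOn with
  | nil => simp [PySem.List.sorted_eq_foldl_insertBy]
  | append_singleton xs x ih =>
    rw [PySem.List.sorted_eq_foldl_insertBy (xs ++ [x]), List.foldl_append,
        ← PySem.List.sorted_eq_foldl_insertBy xs]
    simp only [List.foldl_cons, List.foldl_nil]
    rw [filter_insertBy key p x _ (PySem.List.sorted_pairwise xs key), ih, List.filter_append]
    by_cases hp : p x
    · rw [if_pos hp, List.filter_cons_of_pos hp, List.filter_nil,
        PySem.List.sorted_eq_foldl_insertBy (xs.filter p ++ [x]), List.foldl_append,
        ← PySem.List.sorted_eq_foldl_insertBy (xs.filter p)]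
      simp
    · simp only [Bool.not_eq_true] at hp
      simp [hp]

-- the grouping fold, stated for an arbitrary model list
theorem getD_group_fold (l : List (List (String × String)))
    (d : PySem.Dict String (List (List (String × String)))) (c : String) :
    (l.foldl (fun d m => d.modify (pvProv m) [] (fun v => v ++ [m])) d).getD c [] =
      d.getD c [] ++ l.filter (fun m => pvProv m == c) := by
  have h1 : l.foldl (fun d m => d.modify (pvProv m) [] (fun v => v ++ [m])) d =
      (l.map (fun m => (pvProv m, m))).foldl (fun d p => d.modify p.1 [] (fun v => v ++ [p.2])) d := by
    rw [List.foldl_map]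
  rw [h1, PySem.Dict.getD_foldl_modify_append]
  congr 1
  rw [List.filter_map, List.map_map]
  simp only [Function.comp_def]
  simp

theorem organize_eq (data : List (String × List (List (String × String)))) :
    organize_by_provider data = organize_by_provider_alt data := by
  unfold organize_by_provider organize_by_provider_alt
  dsimp only
  set models := (PySem.Dict.mk data).getD "data" [] with hm
  have hkeysA : (models.foldl (fun d m => d.modify (pvProv m) [] (fun v => v ++ [m])) PySem.Dict.empty).keys
      = PySem.Set.ofList (models.map pvProv) := by
    rw [PySem.Dict.keys_foldl_modify_key models pvProv [] (fun _ m => fun v => v ++ [m])]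
    rfl
  rw [PySem.Dict.items_eq_map_keys _ (by rw [hkeysA]; exact PySem.Set.nodup_ofList _) [],
      hkeysA, List.map_map, PySem.List.dedup_eq_ofList]
  apply List.map_congr_left
  intro k _
  simp only [Function.comp]
  congr 1
  rw [getD_group_fold]
  simp only [PySem.Dict.getD_empty, List.nil_append]
  exact (filter_sorted pvKey (fun m => pvProv m == k) models).symm

-- ===== VERDICT (by name: the statement is the Claim_ definition above) =====
theorem organize_by_provider_spec : Claim_equal_organize_by_provider := by
  intro data _ _
  show organize_by_provider data = organize_by_provider_alt data
  exact organize_eq data
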